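-- pv_equiv track=rewrite | github.com/mikewang004/MinorProject-without-iast-results | IAST-parallel/iast_wrapper-7/python/autosegiast.py | prepare_strings_testiast_dotf
-- ===== SOURCE A (Python) =====
-- def prepare_strings_testiast_dotf(no_compos, mix_combi, temp):
--     mix_combi = [x.strip(" ") for x in mix_combi]
--     str1 = "      write(6,*) "
--     str2 = "      write(6,'(2e20.10)') "
--     str3 = """      write(25,'(A)') "  Pressure (Pa) @ %dK"""%(temp)
--     for i in range(0, no_compos):
--         if i == (no_compos -1):
--             str1 += str("'Ni(%d)   '" %(i+1))
--             str2 += str("Ni(%d)" %(i+1))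
--             #str3 += str("""     %s-%d (mol/kg)" """ %(mix_combi[i], temp))
--             str3 += str(""" %s (mol/kg)" """ %(mix_combi[i]))
--         else:
--             str1 += str("'Ni(%d)   '," %(i+1))
--             str2 += str("Ni(%d)," %(i+1))
--             #str3 += str("     %s-%d (mol/kg)" %(mix_combi[i], temp))
--             str3 += str(" %s (mol/kg)" %(mix_combi[i]))
--     return str1, str2, str3
-- ===== SOURCE B (Python) =====
-- def prepare_strings_testiast_dotf(no_compos, mix_combi, temp):
--     str1 = "      write(6,*) " + ",".join(
--         "'Ni(%d)   '" % (i + 1) for i in range(no_compos))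
--     str2 = "      write(6,'(2e20.10)') " + ",".join(
--         "Ni(%d)" % (i + 1) for i in range(no_compos))
--     str3 = """      write(25,'(A)') "  Pressure (Pa) @ %dK""" % (temp)
--     str3 += "".join(
--         " %s (mol/kg)" % mix_combi[i].strip(" ") for i in range(no_compos))
--     if no_compos > 0:
--         str3 += '" '
--     return str1, str2, str3
-- ===== Notes on version B (the rewrite author's own statement) =====
-- stated objective: simpler
-- what changed: The single loop with an is-this-the-last-iteration branch is replaced by building per-component fragment lists and joining them (','.join for str1/str2, ''.join plus a conditional closing-quote suffix for str3).
import Mathlib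
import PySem

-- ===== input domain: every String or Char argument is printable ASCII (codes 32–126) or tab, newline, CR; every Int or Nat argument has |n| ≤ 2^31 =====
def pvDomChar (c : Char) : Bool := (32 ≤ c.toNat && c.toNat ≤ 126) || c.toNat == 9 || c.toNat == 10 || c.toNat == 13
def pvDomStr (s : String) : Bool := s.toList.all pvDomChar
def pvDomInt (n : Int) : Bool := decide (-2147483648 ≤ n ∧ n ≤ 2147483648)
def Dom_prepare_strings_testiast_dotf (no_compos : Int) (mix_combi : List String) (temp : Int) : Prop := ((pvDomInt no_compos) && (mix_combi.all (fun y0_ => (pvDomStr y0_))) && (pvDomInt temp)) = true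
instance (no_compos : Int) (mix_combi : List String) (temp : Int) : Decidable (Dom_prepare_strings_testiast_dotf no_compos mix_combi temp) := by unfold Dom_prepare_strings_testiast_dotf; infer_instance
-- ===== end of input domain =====

-- B replaces A's loop-with-last-iteration-branch by per-component fragment lists joined with the separator (','.join / ''.join): a different decomposition, simpler.


-- ===== PORT A =====
-- Literal port of A: strip every element, then one loop over range(no_compos)
-- appending to the three strings, with a special branch on the last iteration.
-- mix_combi[i] is ported with PySem.List.pyGetD; Pre_ keeps i in range.
def prepare_strings_testiast_dotf (no_compos : Int) (mix_combi : List String) (temp : Int) : String × String × String :=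
  let mix := mix_combi.map (fun x => PySem.Str.stripChars x " ")
  let str1 := "      write(6,*) "
  let str2 := "      write(6,'(2e20.10)') "
  let str3 := "      write(25,'(A)') \"  Pressure (Pa) @ " ++ PySem.Int.toStr temp ++ "K"
  (PySem.List.pyRange 0 no_compos 1).foldl
    (fun s i =>
      if i == no_compos - 1 then
        (s.1 ++ ("'Ni(" ++ PySem.Int.toStr (i + 1) ++ ")   '"),
         s.2.1 ++ ("Ni(" ++ PySem.Int.toStr (i + 1) ++ ")"),
         s.2.2 ++ (" " ++ PySem.List.pyGetD mix i "" ++ " (mol/kg)\" "))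
      else
        (s.1 ++ ("'Ni(" ++ PySem.Int.toStr (i + 1) ++ ")   '" ++ ","),
         s.2.1 ++ ("Ni(" ++ PySem.Int.toStr (i + 1) ++ ")" ++ ","),
         s.2.2 ++ (" " ++ PySem.List.pyGetD mix i "" ++ " (mol/kg)")))
    (str1, str2, str3)

-- ===== PORT B =====
-- Port of B: build the per-component fragment lists and join them; the closing
-- quote of str3 is appended only when there is at least one component.
def prepare_strings_testiast_dotf_alt (no_compos : Int) (mix_combi : List String) (temp : Int) : String × String × String :=
  let str1 := "      write(6,*) " ++
    PySem.Str.join "," ((PySem.List.pyRange 0 no_compos 1).map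
      (fun i => "'Ni(" ++ PySem.Int.toStr (i + 1) ++ ")   '"))
  let str2 := "      write(6,'(2e20.10)') " ++
    PySem.Str.join "," ((PySem.List.pyRange 0 no_compos 1).map
      (fun i => "Ni(" ++ PySem.Int.toStr (i + 1) ++ ")"))
  let str3 := ("      write(25,'(A)') \"  Pressure (Pa) @ " ++ PySem.Int.toStr temp ++ "K") ++
    PySem.Str.join "" ((PySem.List.pyRange 0 no_compos 1).map
      (fun i => " " ++ PySem.Str.stripChars (PySem.List.pyGetD mix_combi i "") " " ++ " (mol/kg)"))
  let str3 := if no_compos > 0 then str3 ++ "\" " else str3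
  (str1, str2, str3)

-- ===== PRECONDITION & SPEC =====
-- Pre_ excludes exactly the inputs on which the Python A raises IndexError:
-- mix_combi[i] is read for every i < no_compos, so no_compos must not exceed
-- the length of mix_combi (B raises there as well).
def Pre_prepare_strings_testiast_dotf (no_compos : Int) (mix_combi : List String) (temp : Int) : Prop :=
  no_compos ≤ (mix_combi.length : Int)
instance (no_compos : Int) (mix_combi : List String) (temp : Int) : Decidable (Pre_prepare_strings_testiast_dotf no_compos mix_combi temp) := by unfold Pre_prepare_strings_testiast_dotf; infer_instance

def pvWitness_prepare_strings_testiast_dotf : Int × List String × Int := (2, ["CO2 ", " CH4"], 300)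

def Spec_prepare_strings_testiast_dotf (no_compos : Int) (mix_combi : List String) (temp : Int) (out : String × String × String) : Prop := out = prepare_strings_testiast_dotf_alt no_compos mix_combi temp
instance (no_compos : Int) (mix_combi : List String) (temp : Int) (out : String × String × String) : Decidable (Spec_prepare_strings_testiast_dotf no_compos mix_combi temp out) := by unfold Spec_prepare_strings_testiast_dotf; infer_instance

-- ===== CLAIM (what is proved, stated in full; the proofs are below) =====
def Claim_equal_prepare_strings_testiast_dotf : Prop := ∀ (no_compos : Int) (mix_combi : List String) (temp : Int), Dom_prepare_strings_testiast_dotf no_compos mix_combi temp → Pre_prepare_strings_testiast_dotf no_compos mix_combi temp → Spec_prepare_strings_testiast_dotf no_compos mix_combi temp (prepare_strings_testiast_dotf no_compos mix_combi temp)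

-- ===== LEMMAS AND PROOFS =====

-- a fold whose step updates the three components independently splits into three folds
theorem pv_foldl_triple (l : List Int) (g1 g2 g3 : String → Int → String) (a b c : String) :
    l.foldl (fun s i => (g1 s.1 i, g2 s.2.1 i, g3 s.2.2 i)) (a, b, c)
      = (l.foldl g1 a, l.foldl g2 b, l.foldl g3 c) := by
  induction l generalizing a b c with
  | nil => rfl
  | cons x xs ih => simpa using ih (g1 a x) (g2 b x) (g3 c x)

-- move a String fold to the List Char level
theorem pv_foldl_toList (g : String → Int → String) (gc : List Char → Int → List Char)
    (h : ∀ s i, (g s i).toList = gc s.toList i) :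
    ∀ (l : List Int) (base : String), (l.foldl g base).toList = l.foldl gc base.toList := by
  intro l
  induction l with
  | nil => intro base; rfl
  | cons x xs ih => intro base; rw [List.foldl_cons, List.foldl_cons, ih, h]

-- the heart: a left fold that appends "fragment ++ separator", except that the
-- very last iteration (i = n-1) appends "fragment ++ last" instead, is the
-- separator-join of the fragments followed by `last` (when the range is nonempty)
theorem pv_key (f : Int → String) (sep last : String) :
    ∀ (k : Nat) (n a : Int), a = n - (k : Int) → ∀ (base : List Char),
    (PySem.List.pyRange a n 1).foldl
        (fun s i => s ++ (f i).toList ++ (if i == n - 1 then last.toList else sep.toList)) base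
      = base ++ PySem.Chars.join sep.toList ((PySem.List.pyRange a n 1).map (fun i => (f i).toList))
          ++ (if a < n then last.toList else []) := by
  intro k
  induction k with
  | zero =>
    intro n a ha base
    rw [PySem.List.pyRange_one_eq_nil (by omega)]
    simp [PySem.Chars.join_nil, show ¬ a < n by omega]
  | succ k ih =>
    intro n a ha base
    have hlt : a < n := by omega
    by_cases hk : k = 0
    · subst hk
      rw [PySem.List.pyRange_one_cons hlt, PySem.List.pyRange_one_eq_nil (by omega : n ≤ a + 1)]
      simp [show a = n - 1 by omega, PySem.Chars.join_singleton, List.append_assoc]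
    · have hlt2 : a + 1 < n := by omega
      rw [PySem.List.pyRange_one_cons hlt, List.foldl_cons,
        ih n (a + 1) (by omega),
        PySem.List.pyRange_one_cons hlt2]
      simp only [List.map_cons, PySem.Chars.join_cons_cons,
        show (a == n - 1) = false by simp; omega, Bool.false_eq_true, ite_false,
        show a + 1 < n from hlt2, if_pos, hlt]
      simp [List.append_assoc]

-- String-level form of pv_key: the A-shaped fold equals "base ++ join ++ last-suffix"
theorem pv_main (f : Int → String) (sep last : String) (n : Int) (base : String) :
    (PySem.List.pyRange 0 n 1).foldl
        (fun s i => if i == n - 1 then s ++ (f i ++ last) else s ++ (f i ++ sep)) base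
      = (base ++ PySem.Str.join sep ((PySem.List.pyRange 0 n 1).map f))
          ++ (if 0 < n then last else "") := by
  have hg : ∀ (s : String) (i : Int),
      (if i == n - 1 then s ++ (f i ++ last) else s ++ (f i ++ sep)).toList
        = s.toList ++ (f i).toList ++ (if i == n - 1 then last.toList else sep.toList) := by
    intro s i
    by_cases h : (i == n - 1) = true <;>
      simp [h, String.toList_append, List.append_assoc]
  apply String.ext
  rw [pv_foldl_toList (fun s i => if i == n - 1 then s ++ (f i ++ last) else s ++ (f i ++ sep))
    (fun (s : List Char) (i : Int) => s ++ (f i).toList ++ (if i == n - 1 then last.toList else sep.toList))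
    hg]
  by_cases hn : 0 ≤ n
  · rw [pv_key f sep last n.toNat n 0 (by omega) base.toList]
    simp [PySem.Str.toList_join, List.map_map, Function.comp_def, apply_ite String.toList,
      String.toList_append, String.toList_empty, List.append_assoc]
  · rw [PySem.List.pyRange_one_eq_nil (by omega : n ≤ 0)]
    simp [show ¬ 0 < n by omega, PySem.Chars.join_nil, String.toList_append,
      PySem.Str.toList_join]

-- ===== VERDICT (by name: the statement is the Claim_ definition above) =====
theorem prepare_strings_testiast_dotf_spec : Claim_equal_prepare_strings_testiast_dotf := by
  intro n mix temp _ _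
  unfold Spec_prepare_strings_testiast_dotf prepare_strings_testiast_dotf prepare_strings_testiast_dotf_alt
  dsimp only
  have hmix : ∀ i : Int, PySem.List.pyGetD (List.map (fun x => PySem.Str.stripChars x " ") mix) i ""
      = PySem.Str.stripChars (PySem.List.pyGetD mix i "") " " := by
    intro i
    have h0 : PySem.Str.stripChars "" " " = "" := rfl
    conv_lhs => rw [← h0, PySem.List.pyGetD_map]
  have hstep : (fun (s : String × String × String) (i : Int) =>
        if i == n - 1 then
          (s.1 ++ ("'Ni(" ++ PySem.Int.toStr (i + 1) ++ ")   '"),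
           s.2.1 ++ ("Ni(" ++ PySem.Int.toStr (i + 1) ++ ")"),
           s.2.2 ++ (" " ++ PySem.List.pyGetD (List.map (fun x => PySem.Str.stripChars x " ") mix) i "" ++ " (mol/kg)\" "))
        else
          (s.1 ++ ("'Ni(" ++ PySem.Int.toStr (i + 1) ++ ")   '" ++ ","),
           s.2.1 ++ ("Ni(" ++ PySem.Int.toStr (i + 1) ++ ")" ++ ","),
           s.2.2 ++ (" " ++ PySem.List.pyGetD (List.map (fun x => PySem.Str.stripChars x " ") mix) i "" ++ " (mol/kg)")))
      = (fun (s : String × String × String) (i : Int) =>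
          ((fun (t : String) (i : Int) => if i == n - 1
              then t ++ (("'Ni(" ++ PySem.Int.toStr (i + 1) ++ ")   '") ++ "")
              else t ++ (("'Ni(" ++ PySem.Int.toStr (i + 1) ++ ")   '") ++ ",")) s.1 i,
           (fun (t : String) (i : Int) => if i == n - 1
              then t ++ (("Ni(" ++ PySem.Int.toStr (i + 1) ++ ")") ++ "")
              else t ++ (("Ni(" ++ PySem.Int.toStr (i + 1) ++ ")") ++ ",")) s.2.1 i,
           (fun (t : String) (i : Int) => if i == n - 1
              then t ++ ((" " ++ PySem.Str.stripChars (PySem.List.pyGetD mix i "") " " ++ " (mol/kg)") ++ "\" ")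
              else t ++ ((" " ++ PySem.Str.stripChars (PySem.List.pyGetD mix i "") " " ++ " (mol/kg)") ++ "")) s.2.2 i)) := by
    funext s i
    by_cases h : (i == n - 1) = true <;>
      simp [h, hmix, String.append_empty, String.append_assoc,
        show (" (mol/kg)" : String) ++ "\" " = " (mol/kg)\" " from rfl]
  rw [hstep,
    pv_foldl_triple (PySem.List.pyRange 0 n 1)
      (fun t i => if i == n - 1
          then t ++ (("'Ni(" ++ PySem.Int.toStr (i + 1) ++ ")   '") ++ "")
          else t ++ (("'Ni(" ++ PySem.Int.toStr (i + 1) ++ ")   '") ++ ","))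
      (fun t i => if i == n - 1
          then t ++ (("Ni(" ++ PySem.Int.toStr (i + 1) ++ ")") ++ "")
          else t ++ (("Ni(" ++ PySem.Int.toStr (i + 1) ++ ")") ++ ","))
      (fun t i => if i == n - 1
          then t ++ ((" " ++ PySem.Str.stripChars (PySem.List.pyGetD mix i "") " " ++ " (mol/kg)") ++ "\" ")
          else t ++ ((" " ++ PySem.Str.stripChars (PySem.List.pyGetD mix i "") " " ++ " (mol/kg)") ++ "")),
    pv_main (fun i => "'Ni(" ++ PySem.Int.toStr (i + 1) ++ ")   '") "," "" n "      write(6,*) ",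
    pv_main (fun i => "Ni(" ++ PySem.Int.toStr (i + 1) ++ ")") "," "" n "      write(6,'(2e20.10)') ",
    pv_main (fun i => " " ++ PySem.Str.stripChars (PySem.List.pyGetD mix i "") " " ++ " (mol/kg)") "" "\" " n
      ("      write(25,'(A)') \"  Pressure (Pa) @ " ++ PySem.Int.toStr temp ++ "K")]
  by_cases h0 : 0 < n <;>
    simp [h0, String.append_empty, gt_iff_lt]
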